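-- pv_equiv track=rewrite | github.com/Caltrack-pro/Caltrack-pro | backend/calibration_engine.py | _overall_as_left
-- ===== SOURCE A (Python) =====
-- from typing import List, Optional
--
-- def _overall_as_left(results: List[str]) -> str:
--     """Aggregate per-point as-left results.
--
--     Points where no adjustment was made carry "not_required". If ALL points are
--     "not_required" the overall is also "not_required". Otherwise, consider only
--     the evaluated points.
--     """
--     evaluated = [r for r in results if r != "not_required"]
--     if not evaluated:
--         return "not_required"
--     if "fail" in evaluated:
--         return "fail"
--     if "marginal" in evaluated:
--         return "marginal"
--     return "pass"
-- ===== SOURCE B (Python) =====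
-- _RANK = {"not_required": 0, "marginal": 2, "fail": 3}
-- _STATUS = ("not_required", "pass", "marginal", "fail")
--
-- def _overall_as_left(results):
--     """Reduce to the maximum severity rank, then decode it back to a status."""
--     m = max((_RANK.get(r, 1) for r in results), default=0)
--     return _STATUS[m]
-- ===== Notes on version B (the rewrite author's own statement) =====
-- stated objective: alternative
-- what changed: Recasts the aggregation as a max-reduction: each status is mapped to a numeric severity rank via a table (not_required=0, other=1, marginal=2, fail=3), the maximum rank is taken with default 0, and decoded back to a status by indexing a tuple, replacing the filter comprehension and priority membership scans.
import Mathlib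
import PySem

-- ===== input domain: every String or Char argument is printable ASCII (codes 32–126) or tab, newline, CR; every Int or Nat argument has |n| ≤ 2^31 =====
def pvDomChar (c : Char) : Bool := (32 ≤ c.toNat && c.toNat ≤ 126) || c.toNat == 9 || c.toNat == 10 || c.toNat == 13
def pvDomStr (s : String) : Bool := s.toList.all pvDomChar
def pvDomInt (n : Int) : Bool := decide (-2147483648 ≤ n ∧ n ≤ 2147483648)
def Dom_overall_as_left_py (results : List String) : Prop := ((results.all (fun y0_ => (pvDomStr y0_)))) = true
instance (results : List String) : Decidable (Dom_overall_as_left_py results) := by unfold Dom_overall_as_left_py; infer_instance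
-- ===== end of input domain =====

-- B recasts the aggregation as a max-reduction over a numeric severity encoding
-- (rank each status, take the maximum, decode it); alternative decomposition, same O(n) cost.
-- ===== PORT A =====
def overall_as_left_py (results : List String) : String :=
  let evaluated := results.filter (fun r => r ≠ "not_required")
  if evaluated = [] then "not_required"
  else if "fail" ∈ evaluated then "fail"
  else if "marginal" ∈ evaluated then "marginal"
  else "pass"

-- ===== PORT B =====
-- _RANK.get(r, 1)
def pvRank (r : String) : Int :=
  PySem.Dict.getD (PySem.Dict.ofList [("not_required", (0 : Int)), ("marginal", 2), ("fail", 3)]) r 1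

-- max(generator, default=0): every rank is ≥ 0, so this is the fold of max starting at 0
def overall_as_left_py_alt (results : List String) : String :=
  let m : Int := (results.map pvRank).foldl max 0
  (PySem.List.pyGet? ["not_required", "pass", "marginal", "fail"] m).getD ""

-- ===== PRECONDITION & SPEC =====
def Spec_overall_as_left_py (results : List String) (out : String) : Prop := out = overall_as_left_py_alt results
instance (results : List String) (out : String) : Decidable (Spec_overall_as_left_py results out) := by unfold Spec_overall_as_left_py; infer_instance

-- ===== CLAIM (what is proved, stated in full; the proofs are below) =====
def Claim_equal_overall_as_left_py : Prop := ∀ (results : List String), Dom_overall_as_left_py results → Spec_overall_as_left_py results (overall_as_left_py results)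

-- ===== LEMMAS AND PROOFS =====

lemma pvRank_eq (r : String) :
    pvRank r = if r = "not_required" then 0 else if r = "marginal" then 2 else if r = "fail" then 3 else 1 := by
  simp only [pvRank, PySem.Dict.getD_eq_get?_getD]
  have h : PySem.Dict.ofList [("not_required", (0 : Int)), ("marginal", 2), ("fail", 3)]
      = PySem.Dict.mk [("not_required", (0 : Int)), ("marginal", 2), ("fail", 3)] := by decide
  rw [h]
  simp only [PySem.Dict.get?_mk_cons]
  split_ifs <;> simp_all [String.ext_iff]; rfl

lemma foldl_max_max (l : List Int) (a b : Int) :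
    l.foldl max (max a b) = max a (l.foldl max b) := by
  induction l generalizing a b with
  | nil => rfl
  | cons x xs ih => simp only [List.foldl_cons]; rw [max_assoc, ih]

lemma M_cons (x : String) (xs : List String) :
    ((x :: xs).map pvRank).foldl max 0 = max (max 0 (pvRank x)) ((xs.map pvRank).foldl max 0) := by
  simp only [List.map_cons, List.foldl_cons]
  rw [show max 0 (pvRank x) = max (max 0 (pvRank x)) 0 by simp, foldl_max_max]
  simp

-- the maximum severity rank, characterised by the three membership conditions
lemma M_val (xs : List String) :
    (xs.map pvRank).foldl max 0 =
      if "fail" ∈ xs then 3 else if "marginal" ∈ xs then 2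
      else if ∃ r ∈ xs, r ≠ "not_required" then 1 else 0 := by
  induction xs with
  | nil => simp
  | cons x xs ih =>
    rw [M_cons, ih, pvRank_eq]
    by_cases h1 : x = "not_required" <;> by_cases h2 : x = "marginal" <;> by_cases h3 : x = "fail" <;>
      simp_all [List.mem_cons] <;> split_ifs <;> simp_all

-- ===== VERDICT (by name: the statement is the Claim_ definition above) =====
theorem overall_as_left_py_spec : Claim_equal_overall_as_left_py := by
  intro results _
  unfold Spec_overall_as_left_py overall_as_left_py overall_as_left_py_alt
  rw [M_val]
  have hemp : (results.filter (fun r => r ≠ "not_required") = []) ↔ ¬ ∃ r ∈ results, r ≠ "not_required" := by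
    simp [List.filter_eq_nil_iff]
  have hfil : ∀ s : String, s ≠ "not_required" →
      (s ∈ results.filter (fun r => r ≠ "not_required") ↔ s ∈ results) := by
    intro s hs; simp [List.mem_filter, hs]
  by_cases hf : "fail" ∈ results
  · have hne : ¬ (results.filter (fun r => r ≠ "not_required") = []) := by
      rw [hemp]; push_neg; exact ⟨"fail", hf, by decide⟩
    rw [if_pos hf, if_neg hne, if_pos ((hfil "fail" (by decide)).2 hf)]
    decide
  · by_cases hmg : "marginal" ∈ results
    · have hne : ¬ (results.filter (fun r => r ≠ "not_required") = []) := by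
        rw [hemp]; push_neg; exact ⟨"marginal", hmg, by decide⟩
      rw [if_neg hf, if_pos hmg, if_neg hne,
          if_neg (fun hc => hf ((hfil "fail" (by decide)).1 hc)),
          if_pos ((hfil "marginal" (by decide)).2 hmg)]
      decide
    · by_cases he : ∃ r ∈ results, r ≠ "not_required"
      · have hne : ¬ (results.filter (fun r => r ≠ "not_required") = []) := fun hc => (hemp.1 hc) he
        rw [if_neg hf, if_neg hmg, if_pos he, if_neg hne,
            if_neg (fun hc => hf ((hfil "fail" (by decide)).1 hc)),
            if_neg (fun hc => hmg ((hfil "marginal" (by decide)).1 hc))]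
        decide
      · rw [if_neg hf, if_neg hmg, if_neg he, if_pos (hemp.2 he)]
        decide
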